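-- pv_equiv track=rewrite | github.com/sandeepny441/code_101 | Pradeep/easy_449.py | solve
-- ===== SOURCE A (Python) =====
-- def solve(s):
--     def get_all_substr_len(s):
--         l = len(s)
--         if l == 0:
--             return []
--         substr_counts = []
--         i = 0
--         j = 1
--         count = 1
--         cur_char = s[i]
--         while i < l  and j < l:
--             if cur_char == s[j]:
--                 j += 1
--                 count += 1
--             else:
--                 i = j
--                 cur_char = s[i]
--                 j = i + 1
--                 substr_counts.append(count)
--                 count = 1
--         substr_counts.append(count)
--         return substr_counts
--     res = get_all_substr_len(s)
--     return sum([(i * (i+1)) // 2 for i in res])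
-- ===== SOURCE B (Python) =====
-- def solve(s):
--     total = 0
--     run = 0
--     prev = None
--     for c in s:
--         run = run + 1 if c == prev else 1
--         prev = c
--         total += run
--     return total
-- ===== Notes on version B (the rewrite author's own statement) =====
-- stated objective: simpler
-- what changed: Replaces the two-pointer run-length list construction plus a triangular-number sum with a single inline pass that adds the current run length at each character, never materialising the run-length list (measured constant-factor speedup).
import Mathlib
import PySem

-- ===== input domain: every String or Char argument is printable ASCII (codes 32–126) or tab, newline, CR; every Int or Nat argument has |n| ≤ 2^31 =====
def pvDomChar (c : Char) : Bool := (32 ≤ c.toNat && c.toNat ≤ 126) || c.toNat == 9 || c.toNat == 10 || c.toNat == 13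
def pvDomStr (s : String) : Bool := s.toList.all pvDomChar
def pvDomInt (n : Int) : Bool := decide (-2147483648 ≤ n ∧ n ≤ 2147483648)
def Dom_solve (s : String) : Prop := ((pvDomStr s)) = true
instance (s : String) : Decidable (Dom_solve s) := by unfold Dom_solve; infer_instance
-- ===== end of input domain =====

-- B replaces A's run-length-list construction + triangular-number sum with one
-- inline pass accumulating the current run length per character (objective: simpler).

-- ===== PORT A =====
-- the while loop of get_all_substr_len; state (i, j, count, cur_char, substr_counts),
-- terminates because j increases each iteration
def solveLoopA (cs : List Char) (l i j : Nat) (count : Int) (cur : Char)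
    (acc : List Int) : List Int :=
  if _h : i < l ∧ j < l then
    if cs[j]! == cur then
      solveLoopA cs l i (j + 1) (count + 1) cur acc
    else
      solveLoopA cs l j (j + 1) 1 cs[j]! (acc ++ [count])
  else
    acc ++ [count]
termination_by l - j

-- get_all_substr_len
def getAllSubstrLen (cs : List Char) : List Int :=
  let l := cs.length
  if l = 0 then []
  else solveLoopA cs l 0 1 1 cs[0]! []

def solve (s : String) : Int :=
  let res := getAllSubstrLen s.toList
  (res.map (fun i => PySem.Int.floordiv (i * (i + 1)) 2)).sum

-- ===== PORT B =====
-- single pass; state (total, run, prev)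
def solve_alt (s : String) : Int :=
  (s.toList.foldl
    (fun (st : Int × Int × Option Char) c =>
      let run := if (match st.2.2 with | some p => c == p | none => false)
                 then st.2.1 + 1 else 1
      (st.1 + run, run, some c))
    (0, 0, none)).1

-- ===== PRECONDITION & SPEC =====
def Spec_solve (s : String) (out : Int) : Prop := out = solve_alt s
instance (s : String) (out : Int) : Decidable (Spec_solve s out) := by unfold Spec_solve; infer_instance

-- ===== CLAIM (what is proved, stated in full; the proofs are below) =====
def Claim_equal_solve : Prop := ∀ (s : String), Dom_solve s → Spec_solve s (solve s)

-- ===== LEMMAS AND PROOFS =====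

-- reference: run lengths of the remaining suffix, given current char and run count
def goRuns : List Char → Char → Int → List Int
  | [], _, n => [n]
  | d :: ds, c, n => if d == c then goRuns ds c (n + 1) else n :: goRuns ds d 1

def tri (n : Int) : Int := PySem.Int.floordiv (n * (n + 1)) 2

theorem tri_succ (n : Int) : tri (n + 1) = tri n + (n + 1) := by
  unfold tri
  rw [PySem.Int.floordiv_eq_ediv_of_pos (by omega), PySem.Int.floordiv_eq_ediv_of_pos (by omega)]
  have h : (n + 1) * (n + 1 + 1) = n * (n + 1) + (n + 1) * 2 := by ring
  rw [h, Int.add_mul_ediv_right _ _ (by omega)]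

-- A's loop computes the run lengths of the suffix cs.drop j
theorem solveLoopA_eq (cs : List Char) :
    ∀ (fuel j i : Nat) (cur : Char) (count : Int) (acc : List Int),
      cs.length - j ≤ fuel → i < j → j ≤ cs.length →
      solveLoopA cs cs.length i j count cur acc = acc ++ goRuns (cs.drop j) cur count := by
  intro fuel
  induction fuel with
  | zero =>
    intro j i cur count acc hf hij hj
    have hjl : j = cs.length := by omega
    rw [solveLoopA]
    simp [hjl, goRuns]
  | succ f ih =>
    intro j i cur count acc hf hij hj
    rw [solveLoopA]
    by_cases hjl : j < cs.length
    · have hil : i < cs.length := by omega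
      have hget : cs[j]! = cs[j] := getElem!_pos cs j hjl
      have hdrop : cs.drop j = cs[j] :: cs.drop (j + 1) := List.drop_eq_getElem_cons hjl
      simp only [hil, hjl, and_self, dite_true]
      by_cases hc : cs[j]! == cur
      · rw [if_pos hc, ih (j + 1) i cur (count + 1) acc (by omega) (by omega) (by omega)]
        rw [hdrop]
        have : cs[j] = cur := by
          have := hc; rw [hget] at this; exact eq_of_beq this
        simp [goRuns, this]
      · rw [if_neg hc, ih (j + 1) j cs[j]! 1 (acc ++ [count]) (by omega) (by omega) (by omega)]
        rw [hdrop]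
        have hne : (cs[j] == cur) = false := by
          rw [hget] at hc; exact beq_eq_false_iff_ne.mpr (by
            intro h; exact hc (by simp [h]))
        simp [goRuns, hne, hget]
    · have hjl' : j = cs.length := by omega
      have : ¬ (i < cs.length ∧ j < cs.length) := by omega
      simp only [this, dite_false]
      simp [hjl', goRuns]

-- B's fold in terms of the same run-length reference
theorem foldB_eq (ds : List Char) :
    ∀ (c : Char) (n total : Int),
      (ds.foldl
        (fun (st : Int × Int × Option Char) c =>
          let run := if (match st.2.2 with | some p => c == p | none => false)
                     then st.2.1 + 1 else 1
          (st.1 + run, run, some c))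
        (total, n, some c)).1 = total + ((goRuns ds c n).map tri).sum - tri n := by
  induction ds with
  | nil => intro c n total; simp [goRuns]
  | cons d ds ih =>
    intro c n total
    by_cases hdc : d == c
    · have hdc' : d = c := eq_of_beq hdc
      subst hdc'
      simp only [List.foldl_cons, beq_self_eq_true, if_true]
      rw [ih d (n + 1) (total + (n + 1))]
      simp only [goRuns, beq_self_eq_true, if_true]
      rw [tri_succ]
      ring
    · simp only [List.foldl_cons, hdc, Bool.false_eq_true, if_false]
      rw [ih d 1 (total + 1)]
      simp only [goRuns, hdc, Bool.false_eq_true, if_false]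
      simp [tri]
      ring

theorem solve_eq_alt (s : String) : solve s = solve_alt s := by
  unfold solve solve_alt getAllSubstrLen
  cases hcs : s.toList with
  | nil => simp
  | cons c0 rest =>
    have hlen : (c0 :: rest).length = rest.length + 1 := by simp
    simp only [hlen]
    have hne : rest.length + 1 ≠ 0 := by omega
    simp only [if_neg hne]
    have h0 : (c0 :: rest)[0]! = c0 := by simp [getElem!_pos]
    have hA := solveLoopA_eq (c0 :: rest) ((c0 :: rest).length) 1 0 c0 1 []
      (by simp) (by omega) (by simp)
    simp only [List.length_cons] at hA
    rw [h0, hA]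
    simp only [List.drop_succ_cons, List.drop_zero, List.nil_append]
    -- B side
    simp only [List.foldl_cons, Bool.false_eq_true, if_false]
    rw [foldB_eq rest c0 1 (0 + 1)]
    have htri : (fun i => PySem.Int.floordiv (i * (i + 1)) 2) = tri := rfl
    rw [htri]
    have h1 : tri 1 = 1 := by decide
    omega

-- ===== VERDICT (by name: the statement is the Claim_ definition above) =====
theorem solve_spec : Claim_equal_solve := by
  intro s _
  unfold Spec_solve
  exact solve_eq_alt s
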